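-- pv_equiv track=rewrite | github.com/PFGimenez/radio-ids | roc.py | smart_sort
-- ===== SOURCE A (Python) =====
-- def smart_sort(x,y):
--     xy=[(x[i],y[i]) for i in range(len(x))]
--     xy.sort()
--     out=([],[])
--     previous=0
--     for i in range(len(xy)):
--         if xy[i][1]>=previous:
--             previous=xy[i][1]
--             out[0].append(xy[i][0])
--             out[1].append(xy[i][1])
--     return out
-- ===== SOURCE B (Python) =====
-- def smart_sort(x, y):
--     pairs = sorted([(x[i], y[i]) for i in range(len(x))])
--     # keep a pair iff it dominates everything before it in sorted order:
--     # its y is non-negative and no earlier pair has a larger y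
--     kept = [p for i, p in enumerate(pairs)
--             if p[1] >= 0 and all(q[1] <= p[1] for q in pairs[:i])]
--     return ([p[0] for p in kept], [p[1] for p in kept])
-- ===== Notes on version B (the rewrite author's own statement) =====
-- stated objective: alternative
-- what changed: Replaces A's stateful greedy loop (a running maximum carried across iterations with in-place appends) by a stateless dominance test: after sorting, each pair is kept iff its y is non-negative and no earlier pair in the sorted list has a larger y, checked by a quadratic all()-scan over the prefix; kept pairs are then unzipped by comprehensions.
import Mathlib
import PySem

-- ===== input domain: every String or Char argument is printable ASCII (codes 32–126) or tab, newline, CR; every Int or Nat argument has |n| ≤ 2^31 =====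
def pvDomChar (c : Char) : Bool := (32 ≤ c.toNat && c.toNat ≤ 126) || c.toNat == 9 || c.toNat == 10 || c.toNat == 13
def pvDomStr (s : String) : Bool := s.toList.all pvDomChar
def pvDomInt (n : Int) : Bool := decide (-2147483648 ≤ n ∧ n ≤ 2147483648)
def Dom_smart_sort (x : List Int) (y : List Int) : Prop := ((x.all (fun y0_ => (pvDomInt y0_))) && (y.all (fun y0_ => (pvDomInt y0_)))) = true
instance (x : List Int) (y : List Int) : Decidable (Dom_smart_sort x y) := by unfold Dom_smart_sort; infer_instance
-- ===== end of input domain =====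

-- B replaces A's stateful greedy running-maximum loop by a stateless dominance test
-- (keep a sorted pair iff its y is nonneg and no earlier pair's y is larger); alternative, not faster.

-- ===== PORT A =====
-- loop body of A's greedy loop (state = (previous, out))
def smartStep (s : Int × List Int × List Int) (p : Int × Int) : Int × List Int × List Int :=
  if p.2 ≥ s.1 then (p.2, s.2.1 ++ [p.1], s.2.2 ++ [p.2]) else s

-- for i in range(len(xy)): greedy loop carrying (previous, out)
def smart_sort (x : List Int) (y : List Int) : List Int × List Int :=
  let xy := PySem.List.sorted2
    ((PySem.List.pyRange 0 x.length 1).map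
      (fun i => (PySem.List.pyGetD x i 0, PySem.List.pyGetD y i 0)))
    Prod.fst Prod.snd
  let st := (PySem.List.pyRange 0 xy.length 1).foldl
    (fun s i => smartStep s (PySem.List.pyGetD xy i (0, 0))) (0, ([], []))
  st.2

-- ===== PORT B =====
def smart_sort_alt (x : List Int) (y : List Int) : List Int × List Int :=
  let pairs := PySem.List.sorted2
    ((PySem.List.pyRange 0 x.length 1).map
      (fun i => (PySem.List.pyGetD x i 0, PySem.List.pyGetD y i 0)))
    Prod.fst Prod.snd
  -- [p for i, p in enumerate(pairs) if p[1] >= 0 and all(q[1] <= p[1] for q in pairs[:i])]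
  let kept := (PySem.List.enumerate pairs).filter
    (fun ip => decide (ip.2.2 ≥ 0) &&
      (PySem.List.slice pairs none (some ip.1)).all (fun q => decide (q.2 ≤ ip.2.2)))
  (kept.map (fun ip => ip.2.1), kept.map (fun ip => ip.2.2))

-- ===== PRECONDITION & SPEC =====
-- Pre_ excludes exactly the inputs where A raises IndexError: len(y) < len(x) (y[i] out of range).
def Pre_smart_sort (x : List Int) (y : List Int) : Prop := x.length ≤ y.length
instance (x : List Int) (y : List Int) : Decidable (Pre_smart_sort x y) := by unfold Pre_smart_sort; infer_instance
def pvWitness_smart_sort : List Int × List Int := ([3, 1, 2], [5, 4, 6])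
def Spec_smart_sort (x : List Int) (y : List Int) (out : List Int × List Int) : Prop := out = smart_sort_alt x y
instance (x : List Int) (y : List Int) (out : List Int × List Int) : Decidable (Spec_smart_sort x y out) := by unfold Spec_smart_sort; infer_instance

-- ===== CLAIM (what is proved, stated in full; the proofs are below) =====
def Claim_equal_smart_sort : Prop := ∀ (x : List Int) (y : List Int), Dom_smart_sort x y → Pre_smart_sort x y → Spec_smart_sort x y (smart_sort x y)

-- ===== LEMMAS AND PROOFS =====

-- the kept sublist, structural form: keep p iff its y beats the running max m
def keptRec (L : List (Int × Int)) (m : Int) : List (Int × Int) :=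
  match L with
  | [] => []
  | p :: t => if p.2 ≥ m then p :: keptRec t (max m p.2) else keptRec t m

-- B's kept sublist, structural form: keep p iff y ≥ 0 and p dominates all seen predecessors
def keptDom (seen : List (Int × Int)) (L : List (Int × Int)) : List (Int × Int) :=
  match L with
  | [] => []
  | p :: t =>
    if decide (p.2 ≥ 0) && seen.all (fun q => decide (q.2 ≤ p.2))
    then p :: keptDom (seen ++ [p]) t else keptDom (seen ++ [p]) t

-- A's greedy fold produces exactly the keptRec sublist, unzipped
theorem greedy_eq_keptRec (L : List (Int × Int)) (prev : Int) (o1 o2 : List Int) :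
    (L.foldl smartStep (prev, o1, o2)).2 =
    (o1 ++ (keptRec L prev).map Prod.fst, o2 ++ (keptRec L prev).map Prod.snd) := by
  induction L generalizing prev o1 o2 with
  | nil => simp [keptRec]
  | cons p t ih =>
    by_cases h : p.2 ≥ prev
    · have hmax : max prev p.2 = p.2 := by omega
      simp [List.foldl_cons, smartStep, keptRec, h, ih, List.append_assoc]
    · simp [List.foldl_cons, smartStep, keptRec, h, ih]

-- the running max over `seen` floored at 0
def seenMax (seen : List (Int × Int)) : Int := seen.foldl (fun a q => max a q.2) 0

theorem seenMax_le_iff (seen : List (Int × Int)) (c : Int) :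
    seenMax seen ≤ c ↔ 0 ≤ c ∧ ∀ q ∈ seen, q.2 ≤ c := by
  unfold seenMax
  suffices h : ∀ (m : Int), seen.foldl (fun a q => max a q.2) m ≤ c ↔ m ≤ c ∧ ∀ q ∈ seen, q.2 ≤ c from h 0
  induction seen with
  | nil => simp
  | cons p t ih =>
    intro m
    simp only [List.foldl_cons, ih, List.mem_cons]
    constructor
    · rintro ⟨h1, h2⟩
      exact ⟨by omega, fun q hq => hq.elim (fun e => e ▸ by omega) (h2 q)⟩
    · rintro ⟨h1, h2⟩
      exact ⟨by have := h2 p (Or.inl rfl); omega, fun q hq => h2 q (Or.inr hq)⟩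

theorem seenMax_append (seen : List (Int × Int)) (p : Int × Int) :
    seenMax (seen ++ [p]) = max (seenMax seen) p.2 := by
  unfold seenMax; simp

theorem seenMax_nonneg (seen : List (Int × Int)) : 0 ≤ seenMax seen := by
  have := (seenMax_le_iff seen (seenMax seen)).mp le_rfl
  exact this.1

-- the dominance test equals the running-max test
theorem keptDom_eq_keptRec (L seen : List (Int × Int)) :
    keptDom seen L = keptRec L (seenMax seen) := by
  induction L generalizing seen with
  | nil => simp [keptDom, keptRec]
  | cons p t ih =>
    have hcond : (decide (p.2 ≥ 0) && seen.all (fun q => decide (q.2 ≤ p.2))) = true ↔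
        p.2 ≥ seenMax seen := by
      simp only [Bool.and_eq_true, decide_eq_true_eq, List.all_eq_true, ge_iff_le]
      rw [← seenMax_le_iff]
    by_cases h : p.2 ≥ seenMax seen
    · have : (decide (p.2 ≥ 0) && seen.all (fun q => decide (q.2 ≤ p.2))) = true := hcond.mpr h
      simp only [keptDom, keptRec, this, if_true, if_pos h, ih, seenMax_append]
    · have : ¬ ((decide (p.2 ≥ 0) && seen.all (fun q => decide (q.2 ≤ p.2))) = true) :=
        fun hc => h (hcond.mp hc)
      have hmax : max (seenMax seen) p.2 = seenMax seen := by
        have := seenMax_nonneg seen; omega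
      simp only [keptDom, keptRec, if_neg this, if_neg h, ih, seenMax_append, hmax]

-- B's enumerate/slice filter equals keptDom, generalized over the processed prefix `seen`
theorem filter_enumerate_eq_keptDom (rest seen : List (Int × Int)) :
    ((PySem.List.enumerate rest (seen.length : Int)).filter
      (fun ip => decide (ip.2.2 ≥ 0) &&
        (PySem.List.slice (seen ++ rest) none (some ip.1)).all
          (fun q => decide (q.2 ≤ ip.2.2)))).map Prod.snd
    = keptDom seen rest := by
  induction rest generalizing seen with
  | nil => simp [PySem.List.enumerate_nil, keptDom]
  | cons p t ih =>
    rw [PySem.List.enumerate_cons]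
    have hslice : PySem.List.slice (seen ++ p :: t) none (some (seen.length : Int)) = seen := by
      rw [PySem.List.slice_to_natCast]
      exact List.take_left
    have hshift : ((seen.length : Int) + 1) = ((seen ++ [p]).length : Int) := by
      simp
    have hrest : seen ++ p :: t = (seen ++ [p]) ++ t := by simp
    by_cases h : (decide (p.2 ≥ 0) && seen.all (fun q => decide (q.2 ≤ p.2))) = true
    · rw [List.filter_cons]
      simp only [hslice, h, if_true, List.map_cons, keptDom]
      rw [hshift, hrest, ih]
    · rw [List.filter_cons]
      simp only [hslice, h, Bool.false_eq_true, if_false, keptDom]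
      rw [hshift, hrest, ih]

-- ===== VERDICT (by name: the statement is the Claim_ definition above) =====
theorem smart_sort_spec : Claim_equal_smart_sort := by
  intro x y _ _
  unfold Spec_smart_sort smart_sort smart_sort_alt
  dsimp only
  rw [show ((PySem.List.sorted2
        (List.map (fun i => (PySem.List.pyGetD x i 0, PySem.List.pyGetD y i 0))
          (PySem.List.pyRange 0 x.length 1)) Prod.fst Prod.snd).length : Int)
      = PySem.List.len (PySem.List.sorted2
        (List.map (fun i => (PySem.List.pyGetD x i 0, PySem.List.pyGetD y i 0))
          (PySem.List.pyRange 0 x.length 1)) Prod.fst Prod.snd) from rfl,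
    PySem.List.foldl_pyRange_zero_pyGetD]
  set pairs := PySem.List.sorted2
    ((PySem.List.pyRange 0 x.length 1).map
      (fun i => (PySem.List.pyGetD x i 0, PySem.List.pyGetD y i 0))) Prod.fst Prod.snd with hp
  rw [greedy_eq_keptRec pairs 0 [] []]
  have h0 : (PySem.List.enumerate pairs 0) = PySem.List.enumerate pairs (([] : List (Int × Int)).length : Int) := by simp
  have hfilter := filter_enumerate_eq_keptDom pairs []
  simp only [List.nil_append] at hfilter
  have hkd := keptDom_eq_keptRec pairs []
  have hsm : seenMax [] = 0 := by simp [seenMax]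
  rw [hsm] at hkd
  rw [← hkd, ← hfilter, h0]
  simp [List.map_map, Function.comp]
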